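-- pv_equiv track=rewrite | github.com/ABer78/Unit3-Functions | Lesson 2 - Collection Essential/Part 3 - Dictionaries/practice_classwork.py | find_most_followed
-- ===== SOURCE A (Python) =====
-- def find_most_followed(users):
--     most = 0
--     most_followed = {}
--     for user in users:
--         if user.get("followers") > most:
--             most = user.get("followers")
--             most_followed = user
--     return most_followed
-- ===== SOURCE B (Python) =====
-- def find_most_followed(users):
--     candidates = sorted((u for u in users if u.get("followers") > 0),
--                         key=lambda u: u.get("followers"), reverse=True)
--     return candidates[0] if candidates else {}
-- ===== Notes on version B (the rewrite author's own statement) =====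
-- stated objective: alternative
-- what changed: Replaced the running-max accumulator loop with a pipeline: keep the users with a positive follower count, stably sort them descending by followers, and return the head (or {} when there are no candidates); Pre_ excludes users lacking the 'followers' key, on which A raises TypeError.
import Mathlib
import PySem

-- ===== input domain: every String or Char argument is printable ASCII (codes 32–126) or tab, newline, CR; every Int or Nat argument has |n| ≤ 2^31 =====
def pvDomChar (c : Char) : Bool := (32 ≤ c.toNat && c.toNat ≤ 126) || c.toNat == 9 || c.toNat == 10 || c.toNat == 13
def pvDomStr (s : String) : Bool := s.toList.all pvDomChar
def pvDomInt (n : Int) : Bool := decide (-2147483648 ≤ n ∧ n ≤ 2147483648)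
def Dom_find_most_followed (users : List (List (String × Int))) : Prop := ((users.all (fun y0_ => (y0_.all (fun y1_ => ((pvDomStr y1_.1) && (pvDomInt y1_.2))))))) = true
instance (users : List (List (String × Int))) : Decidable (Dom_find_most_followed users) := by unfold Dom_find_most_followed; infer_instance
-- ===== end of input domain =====

-- B replaces A's running-max loop by a pipeline — filter to positive-follower candidates, stable descending sort, head —
-- an alternative decomposition, not faster.


-- user.get("followers"): first-match association-list lookup (dict convention)
def pvFoll? (u : List (String × Int)) : Option Int :=
  (PySem.Dict.mk u).get? "followers"

-- under Pre_ the key is present, so getD 0 is exact (the missing-key case is excluded by Pre_)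
def pvFoll (u : List (String × Int)) : Int := (pvFoll? u).getD 0

-- ===== PORT A =====
-- literal port of A: running state (most, most_followed), initially (0, {})
def find_most_followed (users : List (List (String × Int))) : List (String × Int) :=
  (users.foldl
    (fun st user => if pvFoll user > st.1 then (pvFoll user, user) else st)
    ((0 : Int), ([] : List (String × Int)))).2

-- ===== PORT B =====
-- literal port of Source B: filter to positive-follower candidates, stable descending sort, head if nonempty
def find_most_followed_alt (users : List (List (String × Int))) : List (String × Int) :=
  match PySem.List.sorted (users.filter (fun u => decide (0 < pvFoll u))) pvFoll true with
  | [] => []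
  | top :: _ => top

-- ===== PRECONDITION & SPEC =====
-- Pre_ excludes users lacking the "followers" key: there Python A raises TypeError (None > int), returning nothing.
def Pre_find_most_followed (users : List (List (String × Int))) : Prop :=
  (users.all (fun u => (pvFoll? u).isSome)) = true
instance (users : List (List (String × Int))) : Decidable (Pre_find_most_followed users) := by unfold Pre_find_most_followed; infer_instance

def pvWitness_find_most_followed : (List (List (String × Int))) :=
  [[("followers", 3)], [("followers", 3), ("name", 0)]]

def Spec_find_most_followed (users : List (List (String × Int))) (out : List (String × Int)) : Prop := out = find_most_followed_alt users
instance (users : List (List (String × Int))) (out : List (String × Int)) : Decidable (Spec_find_most_followed users out) := by unfold Spec_find_most_followed; infer_instance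

-- ===== CLAIM (what is proved, stated in full; the proofs are below) =====
def Claim_equal_find_most_followed : Prop := ∀ (users : List (List (String × Int))), Dom_find_most_followed users → Pre_find_most_followed users → Spec_find_most_followed users (find_most_followed users)

-- ===== LEMMAS AND PROOFS =====

-- the running first-maximum fold (what both sides reduce to)
def runMax (a : List (String × Int)) (xs : List (List (String × Int))) : List (String × Int) :=
  xs.foldl (fun c y => if pvFoll c < pvFoll y then y else c) a

theorem runMax_cons (a x : List (String × Int)) (xs : List (List (String × Int))) :
    runMax a (x :: xs) = runMax (if pvFoll a < pvFoll x then x else a) xs := rfl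

theorem pvFoll_nil : pvFoll [] = 0 := rfl

-- A's fold is runMax seeded with the empty dict (whose pvFoll is 0)
theorem A_eq_runMax (users : List (List (String × Int))) :
    find_most_followed users = runMax [] users := by
  unfold find_most_followed
  suffices h : ∀ xs (a : List (String × Int)),
      (xs.foldl (fun st user => if pvFoll user > st.1 then (pvFoll user, user) else st)
        (pvFoll a, a)).2 = runMax a xs by
    simpa [pvFoll_nil] using h users []
  intro xs
  induction xs with
  | nil => intro a; rfl
  | cons x t ih =>
    intro a
    simp only [List.foldl_cons, runMax_cons]
    by_cases h : pvFoll a < pvFoll x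
    · simpa [h, show pvFoll x > pvFoll a from h] using ih x
    · simpa [h, show ¬ pvFoll x > pvFoll a from h] using ih a

-- a seed with non-negative key lets the fold skip exactly the non-positive elements
theorem runMax_filter (xs : List (List (String × Int))) :
    ∀ a, 0 ≤ pvFoll a →
      runMax a xs = runMax a (xs.filter (fun u => decide (0 < pvFoll u))) := by
  induction xs with
  | nil => intro a _; rfl
  | cons y t ih =>
    intro a ha
    rw [runMax_cons]
    by_cases hy : 0 < pvFoll y
    · rw [List.filter_cons_of_pos (by simpa using hy), runMax_cons]
      by_cases h : pvFoll a < pvFoll y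
      · rw [if_pos h]; exact ih y (le_of_lt hy)
      · rw [if_neg h]; exact ih a ha
    · rw [List.filter_cons_of_neg (by simpa using hy)]
      rw [not_lt] at hy
      rw [if_neg (not_lt.mpr (le_trans hy ha))]
      exact ih a ha

-- head of the insertion-sorted (descending, stable) list is the running first-maximum
theorem sorted_head (xs : List (List (String × Int))) :
    ∀ (b : List (String × Int)) (tl : List (List (String × Int))),
      ∃ tl', xs.foldl (fun acc x => PySem.List.insertBy (fun a c => decide (pvFoll c < pvFoll a)) x acc) (b :: tl)
        = runMax b xs :: tl' := by
  induction xs with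
  | nil => intro b tl; exact ⟨tl, rfl⟩
  | cons x t ih =>
    intro b tl
    simp only [List.foldl_cons, PySem.List.insertBy]
    by_cases h : pvFoll b < pvFoll x
    · simp only [decide_eq_true_eq, if_pos h]
      obtain ⟨tl', h'⟩ := ih x (b :: tl)
      exact ⟨tl', by rw [h', runMax_cons, if_pos h]⟩
    · simp only [decide_eq_true_eq, if_neg h]
      obtain ⟨tl', h'⟩ := ih b (PySem.List.insertBy (fun a c => decide (pvFoll c < pvFoll a)) x tl)
      exact ⟨tl', by rw [h', runMax_cons, if_neg h]⟩

-- B computes the runMax of the filtered candidate list (or [] when there are none)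
theorem B_eq_runMax (users : List (List (String × Int))) :
    find_most_followed_alt users
      = match users.filter (fun u => decide (0 < pvFoll u)) with
        | [] => []
        | f0 :: frest => runMax f0 frest := by
  unfold find_most_followed_alt
  rw [PySem.List.sorted_rev_eq_foldl_insertBy]
  cases hf : users.filter (fun u => decide (0 < pvFoll u)) with
  | nil => rfl
  | cons f0 frest =>
    simp only [List.foldl_cons, PySem.List.insertBy]
    obtain ⟨tl', h'⟩ := sorted_head frest f0 []
    rw [h']

-- ===== VERDICT (by name: the statement is the Claim_ definition above) =====
theorem find_most_followed_spec : Claim_equal_find_most_followed := by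
  intro users _ _
  unfold Spec_find_most_followed
  rw [A_eq_runMax, B_eq_runMax,
      runMax_filter users [] (by rw [pvFoll_nil])]
  cases hf : users.filter (fun u => decide (0 < pvFoll u)) with
  | nil => rfl
  | cons f0 frest =>
    have hf0 : 0 < pvFoll f0 := by
      have := List.mem_filter.mp (hf ▸ List.mem_cons_self : f0 ∈ users.filter (fun u => decide (0 < pvFoll u)))
      simpa using this.2
    rw [runMax_cons, pvFoll_nil, if_pos hf0]
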